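-- pv_equiv track=rewrite | github.com/homuramagica/FinancialTransactionAssistantAgent | scripts/news_update_harness.py | _find_intro_line
-- ===== SOURCE A (Python) =====
-- def _find_intro_line(lines: list[str]) -> str | None:
--     title_seen = False
--     spacer_seen = False
--     for raw in lines:
--         line = raw.strip()
--         if not line:
--             continue
--         if not title_seen:
--             title_seen = True
--             continue
--         if not spacer_seen and line == "&nbsp;":
--             spacer_seen = True
--             continue
--         if spacer_seen:
--             return line
--     return None
-- ===== SOURCE B (Python) =====
-- def _find_intro_line(lines):
--     cleaned = [l.strip() for l in lines if l.strip()]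
--     try:
--         idx = cleaned.index("&nbsp;", 1)
--     except ValueError:
--         return None
--     return cleaned[idx + 1] if idx + 1 < len(cleaned) else None
-- ===== Notes on version B (the rewrite author's own statement) =====
-- stated objective: simpler
-- what changed: Replaces A's interleaved title/spacer boolean state machine with a filter pass (stripped non-empty lines) followed by a single cleaned.index('&nbsp;', 1) locate and a +1 offset lookup.
import Mathlib
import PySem

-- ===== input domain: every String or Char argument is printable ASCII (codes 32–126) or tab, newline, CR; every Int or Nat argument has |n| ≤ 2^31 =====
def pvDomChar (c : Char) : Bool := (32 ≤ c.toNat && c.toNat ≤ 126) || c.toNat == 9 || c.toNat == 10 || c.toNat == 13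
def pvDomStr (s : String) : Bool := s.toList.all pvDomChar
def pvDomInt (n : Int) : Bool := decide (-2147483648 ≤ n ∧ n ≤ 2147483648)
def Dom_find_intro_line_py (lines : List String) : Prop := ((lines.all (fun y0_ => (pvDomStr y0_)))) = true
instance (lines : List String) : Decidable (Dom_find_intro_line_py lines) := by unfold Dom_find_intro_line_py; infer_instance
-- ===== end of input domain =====

-- B replaces A's title/spacer boolean state machine by a filter pass plus index('&nbsp;', 1) and a +1 lookup (objective: simpler).

-- ===== PORT A =====
-- the for-loop with early return and the two booleans, step for step
def findIntroGoA (title_seen spacer_seen : Bool) : List String → Option String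
  | [] => none
  | raw :: rest =>
    let line := PySem.Str.strip raw
    if line = "" then findIntroGoA title_seen spacer_seen rest
    else if !title_seen then findIntroGoA true spacer_seen rest
    else if !spacer_seen && line == "&nbsp;" then findIntroGoA title_seen true rest
    else if spacer_seen then some line
    else findIntroGoA title_seen spacer_seen rest

def find_intro_line_py (lines : List String) : Option String :=
  findIntroGoA false false lines

-- ===== PORT B =====
-- Python's list.index(x, start): first index ≥ start holding x, none = ValueError
def pyIndexFrom (xs : List String) (start : Nat) (x : String) : Option Nat :=
  ((xs.drop start).findIdx? (· == x)).map (· + start)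

def find_intro_line_py_alt (lines : List String) : Option String :=
  let cleaned := (lines.filter (fun l => PySem.Str.strip l ≠ "")).map PySem.Str.strip
  match pyIndexFrom cleaned 1 "&nbsp;" with
  | none => none
  | some idx => if idx + 1 < cleaned.length then (cleaned)[idx + 1]? else none

-- ===== PRECONDITION & SPEC =====
def Spec_find_intro_line_py (lines : List String) (out : Option String) : Prop := out = find_intro_line_py_alt lines
instance (lines : List String) (out : Option String) : Decidable (Spec_find_intro_line_py lines out) := by unfold Spec_find_intro_line_py; infer_instance

-- ===== CLAIM (what is proved, stated in full; the proofs are below) =====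
def Claim_equal_find_intro_line_py : Prop := ∀ (lines : List String), Dom_find_intro_line_py lines → Spec_find_intro_line_py lines (find_intro_line_py lines)

-- ===== LEMMAS AND PROOFS =====

-- A's loop, re-expressed on the cleaned list (no empty lines)
def findIntroClean (title_seen spacer_seen : Bool) : List String → Option String
  | [] => none
  | l :: rest =>
    if !title_seen then findIntroClean true spacer_seen rest
    else if !spacer_seen && l == "&nbsp;" then findIntroClean title_seen true rest
    else if spacer_seen then some l
    else findIntroClean title_seen spacer_seen rest

theorem findIntroGoA_eq_clean (t s : Bool) (lines : List String) :
    findIntroGoA t s lines =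
      findIntroClean t s ((lines.filter (fun l => PySem.Str.strip l ≠ "")).map PySem.Str.strip) := by
  induction lines generalizing t s with
  | nil => rfl
  | cons raw rest ih =>
    by_cases h : PySem.Str.strip raw = ""
    · simp [findIntroGoA, h, ih]
    · rw [findIntroGoA, show ((raw :: rest).filter (fun l => PySem.Str.strip l ≠ "")).map
          PySem.Str.strip = PySem.Str.strip raw ::
          ((rest.filter (fun l => PySem.Str.strip l ≠ "")).map PySem.Str.strip) by
            simp [h], findIntroClean]
      simp [h, ih]

-- after the spacer has been seen, A returns the head of what remains
theorem findIntroClean_spacer (c : List String) : findIntroClean true true c = c.head? := by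
  cases c with
  | nil => rfl
  | cons l rest => simp [findIntroClean]

-- past the title, A's scan is: find the first "&nbsp;", return the element after it
theorem findIntroClean_title (c : List String) :
    findIntroClean true false c =
      match c.findIdx? (· == "&nbsp;") with
      | none => none
      | some j => (c)[j + 1]? := by
  induction c with
  | nil => rfl
  | cons l rest ih =>
    by_cases h : l = "&nbsp;"
    · subst h
      simp [findIntroClean, findIntroClean_spacer, List.findIdx?_cons, List.head?_eq_getElem?]
    · have hb : (l == "&nbsp;") = false := by simp [h]
      rw [findIntroClean]
      simp only [hb, Bool.and_false, Bool.not_true, Bool.not_false,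
        List.findIdx?_cons, ih]
      cases hf : rest.findIdx? (· == "&nbsp;") <;> simp

-- B's bounded lookup equals the plain optional lookup
theorem guarded_get (c : List String) (k : Nat) :
    (if k < c.length then (c)[k]? else none) = (c)[k]? := by
  split
  · rfl
  · rename_i hk
    rw [List.getElem?_eq_none (show c.length ≤ k by omega)]

-- ===== VERDICT (by name: the statement is the Claim_ definition above) =====
theorem find_intro_line_py_spec : Claim_equal_find_intro_line_py := by
  intro lines _
  unfold Spec_find_intro_line_py find_intro_line_py find_intro_line_py_alt
  rw [findIntroGoA_eq_clean]
  set c := (lines.filter (fun l => PySem.Str.strip l ≠ "")).map PySem.Str.strip with hc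
  cases c with
  | nil => rfl
  | cons h0 tail =>
    -- A: the first cleaned line is the title regardless of its content
    have hA : findIntroClean false false (h0 :: tail) = findIntroClean true false tail := by
      simp [findIntroClean]
    rw [hA, findIntroClean_title]
    -- B: index from 1 searches the tail and shifts by one
    simp only [pyIndexFrom, List.drop_one, List.tail_cons]
    cases hf : tail.findIdx? (· == "&nbsp;") with
    | none => simp
    | some j =>
      simp only [Option.map_some, guarded_get]
      simp
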